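-- pv_equiv track=rewrite | github.com/gringrape/daily-coding-dojo | 20210823/python2/test_solution.py | solution
-- ===== SOURCE A (Python) =====
-- def solution(prices):
--     stack = []
--
--     def pop_and_record(current_time):
--         stored_time, _ = stack.pop()
--         prices[stored_time] = current_time - stored_time
--
--     for time, price in enumerate(prices):
--         while stack and stack[-1][1] > price:
--             pop_and_record(time)
--         stack.append((time, price))
--
--     while stack:
--         pop_and_record(len(prices) - 1)
--
--     return prices
-- ===== SOURCE B (Python) =====
-- def solution(prices):
--     original = list(prices)
--     n = len(original)
--     for i in range(n):
--         d = (n - 1) - i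
--         for j in range(i + 1, n):
--             if original[j] < original[i]:
--                 d = j - i
--                 break
--         prices[i] = d
--     return prices
-- ===== Notes on version B (the rewrite author's own statement) =====
-- stated objective: simpler
-- what changed: Replaces the monotonic stack with a direct per-index forward scan over a snapshot of the original values: for each i, find the first later strictly smaller price (duration j-i), else (n-1)-i.
import Mathlib
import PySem

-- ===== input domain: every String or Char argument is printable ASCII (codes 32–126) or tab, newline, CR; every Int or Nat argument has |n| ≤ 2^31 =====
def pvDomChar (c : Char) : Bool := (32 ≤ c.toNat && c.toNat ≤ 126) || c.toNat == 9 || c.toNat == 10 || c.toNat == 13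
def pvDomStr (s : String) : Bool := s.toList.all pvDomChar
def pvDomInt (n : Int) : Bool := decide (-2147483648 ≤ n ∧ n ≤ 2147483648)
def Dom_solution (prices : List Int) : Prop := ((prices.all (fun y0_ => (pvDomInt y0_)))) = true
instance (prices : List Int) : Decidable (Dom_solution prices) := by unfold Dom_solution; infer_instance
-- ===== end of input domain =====

-- B replaces A's monotonic stack by a plain per-index forward scan for the first strictly
-- smaller later price (objective: simpler).  Both Pythons mutate `prices` in place identically
-- and return the same object; the equivalence proved here is about the return value.

-- ===== PORT A =====
-- Python mutates `prices` during the for-loop, but only at indices < time, so the values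
-- `enumerate` yields are the original ones; folding over the original (index, value) pairs
-- is therefore exact.
def pvPopLoop (cur : Nat) (p : Int) : List (Nat × Int) → List Int → List (Nat × Int) × List Int
  | [], pr => ([], pr)
  | (t, q) :: rest, pr =>
    if q > p then pvPopLoop cur p rest (pr.set t ((cur : Int) - (t : Int)))
    else ((t, q) :: rest, pr)

def pvStep (s : List (Nat × Int) × List Int) (tp : Nat × Int) : List (Nat × Int) × List Int :=
  let r := pvPopLoop tp.1 tp.2 s.1 s.2
  ((tp.1, tp.2) :: r.1, r.2)

def pvEnumFrom (k : Nat) : List Int → List (Nat × Int)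
  | [] => []
  | x :: xs => (k, x) :: pvEnumFrom (k + 1) xs

def pvDrain (cur : Nat) : List (Nat × Int) → List Int → List Int
  | [], pr => pr
  | (t, _) :: rest, pr => pvDrain cur rest (pr.set t ((cur : Int) - (t : Int)))

def solution (prices : List Int) : List Int :=
  let r := (pvEnumFrom 0 prices).foldl pvStep ([], prices)
  pvDrain (prices.length - 1) r.1 r.2

-- ===== PORT B =====
def pvScan (v : Int) (i n : Nat) : Nat → List Int → Int
  | _, [] => ((n : Int) - 1) - (i : Int)
  | j, x :: xs => if x < v then (j : Int) - (i : Int) else pvScan v i n (j + 1) xs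

def solution_alt (prices : List Int) : List Int :=
  prices.mapIdx (fun i v => pvScan v i prices.length (i + 1) (prices.drop (i + 1)))

-- ===== PRECONDITION & SPEC =====
def Spec_solution (prices : List Int) (out : List Int) : Prop := out = solution_alt prices
instance (prices : List Int) (out : List Int) : Decidable (Spec_solution prices out) := by unfold Spec_solution; infer_instance

-- ===== CLAIM (what is proved, stated in full; the proofs are below) =====
def Claim_equal_solution : Prop := ∀ (prices : List Int), Dom_solution prices → Spec_solution prices (solution prices)

-- ===== LEMMAS AND PROOFS =====

-- value at index i (indices used are always in range)
def pvG (orig : List Int) (i : Nat) : Int := orig.getD i 0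

-- i is still on the stack after the first k steps: no strictly smaller value in (i, k)
def pvKept (orig : List Int) (k i : Nat) : Bool := decide (∀ j, j < k → i < j → pvG orig i ≤ pvG orig j)

def pvEmb (orig : List Int) (i : Nat) : Nat × Int := (i, pvG orig i)

def pvStack (orig : List Int) (k : Nat) : List (Nat × Int) :=
  (((List.range k).filter (pvKept orig k)).reverse).map (pvEmb orig)

def pvSet (cur : Nat) (pr : List Int) (tp : Nat × Int) : List Int :=
  pr.set tp.1 ((cur : Int) - (tp.1 : Int))

def pvPr (orig : List Int) (k : Nat) : List Int :=
  (List.range orig.length).map (fun i =>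
    match ((orig.take k).drop (i + 1)).findIdx? (fun x => decide (x < pvG orig i)) with
    | some m => ((i + 1 + m : Nat) : Int) - (i : Int)
    | none => pvG orig i)

lemma popLoop_eq (cur : Nat) (p : Int) : ∀ (L : List (Nat × Int)) (pr : List Int),
    pvPopLoop cur p L pr = (L.dropWhile (fun tp => decide (p < tp.2)),
      (L.takeWhile (fun tp => decide (p < tp.2))).foldl (pvSet cur) pr) := by
  intro L
  induction L with
  | nil => intro pr; simp [pvPopLoop]
  | cons tq rest ih =>
    intro pr
    obtain ⟨t, q⟩ := tq
    by_cases h : p < q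
    · simp [pvPopLoop, h, ih, pvSet]
    · simp [pvPopLoop, h]

lemma dropWhile_eq_filter_of_sorted (p : Int) : ∀ (L : List (Nat × Int)),
    L.Pairwise (fun a b => b.2 ≤ a.2) →
    L.dropWhile (fun tp => decide (p < tp.2)) = L.filter (fun tp => decide (tp.2 ≤ p)) := by
  intro L
  induction L with
  | nil => intro _; simp
  | cons a l ih =>
    intro hp
    rcases List.pairwise_cons.mp hp with ⟨ha, hl⟩
    by_cases h : p < a.2
    · have h' : ¬ (a.2 ≤ p) := by omega
      simp only [List.dropWhile_cons, List.filter_cons, h, h', decide_true, decide_false,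
        if_true, Bool.false_eq_true, if_false]
      exact ih hl
    · have h' : a.2 ≤ p := by omega
      simp only [List.dropWhile_cons, List.filter_cons, h, h', decide_true, decide_false,
        if_true, Bool.false_eq_true, if_false]
      congr 1
      symm
      rw [List.filter_eq_self]
      intro b hb
      have := ha b hb
      simp; omega

lemma takeWhile_eq_filter_of_sorted (p : Int) : ∀ (L : List (Nat × Int)),
    L.Pairwise (fun a b => b.2 ≤ a.2) →
    L.takeWhile (fun tp => decide (p < tp.2)) = L.filter (fun tp => decide (p < tp.2)) := by
  intro L
  induction L with
  | nil => intro _; simp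
  | cons a l ih =>
    intro hp
    rcases List.pairwise_cons.mp hp with ⟨ha, hl⟩
    by_cases h : p < a.2
    · simp only [List.takeWhile_cons, List.filter_cons, h, decide_true, if_true]
      rw [ih hl]
    · simp only [List.takeWhile_cons, List.filter_cons, h, decide_false, Bool.false_eq_true,
        if_false]
      symm
      rw [List.filter_eq_nil_iff]
      intro b hb
      have := ha b hb
      simp; omega

lemma pvStack_sorted (orig : List Int) (k : Nat) :
    (pvStack orig k).Pairwise (fun a b => b.2 ≤ a.2) := by
  unfold pvStack
  rw [List.pairwise_map, List.pairwise_reverse]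
  have h1 : ((List.range k).filter (pvKept orig k)).Pairwise (· < ·) :=
    (List.pairwise_lt_range).filter _
  refine h1.imp_of_mem ?_
  intro a b ha hb hab
  have hbk : b < k := List.mem_range.mp (List.mem_filter.mp hb).1
  have hka : pvKept orig k a = true := (List.mem_filter.mp ha).2
  simp only [pvKept, decide_eq_true_eq] at hka
  exact hka b hbk hab

lemma foldl_set_length (cur : Nat) : ∀ (L : List (Nat × Int)) (pr : List Int),
    (L.foldl (pvSet cur) pr).length = pr.length := by
  intro L
  induction L with
  | nil => intro pr; rfl
  | cons tq rest ih => intro pr; rw [List.foldl_cons, ih]; simp [pvSet]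

lemma foldl_set_getD (cur : Nat) : ∀ (L : List (Nat × Int)) (pr : List Int) (i : Nat),
    (L.foldl (pvSet cur) pr).getD i 0 =
      if L.any (fun tp => tp.1 == i) then
        (if i < pr.length then (cur : Int) - (i : Nat) else pr.getD i 0)
      else pr.getD i 0 := by
  intro L
  induction L with
  | nil => intro pr i; simp
  | cons tq rest ih =>
    intro pr i
    simp only [List.foldl_cons, List.any_cons]
    rw [ih]
    have hlen : (pvSet cur pr tq).length = pr.length := by simp [pvSet]
    have hgetne : tq.1 ≠ i → (pvSet cur pr tq).getD i 0 = pr.getD i 0 := by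
      intro ht
      rw [List.getD_eq_getElem?_getD, List.getD_eq_getElem?_getD, pvSet,
        List.getElem?_set_ne ht]
    have hgetout : ¬ i < pr.length → (pvSet cur pr tq).getD i 0 = pr.getD i 0 := by
      intro hi
      rw [List.getD_eq_getElem?_getD, List.getD_eq_getElem?_getD,
        List.getElem?_eq_none (by rw [hlen]; omega), List.getElem?_eq_none (by omega)]
    by_cases ht : tq.1 = i
    · simp only [ht, beq_self_eq_true, Bool.true_or, hlen, if_true]
      by_cases hi : i < pr.length
      · have hgeteq : (pvSet cur pr tq).getD i 0 = (cur : Int) - (i : Nat) := by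
          rw [List.getD_eq_getElem?_getD, pvSet, ht, List.getElem?_set_self hi]; rfl
        rw [hgeteq]
        cases rest.any (fun tp => tp.1 == i) <;> simp [hi]
      · rw [hgetout hi]
        cases rest.any (fun tp => tp.1 == i) <;> simp [hi]
    · have hbeq : (tq.1 == i) = false := by simp [ht]
      simp only [hbeq, Bool.false_or, hlen, hgetne ht]

lemma stack_filter (orig : List Int) (k : Nat) (pb : Int → Bool) :
    (pvStack orig k).filter (fun tp => pb tp.2) =
      (((List.range k).filter (fun i => pvKept orig k i && pb (pvG orig i))).reverse).map (pvEmb orig) := by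
  unfold pvStack
  rw [List.filter_map, List.filter_reverse, List.filter_filter]
  congr 2
  apply List.filter_congr
  intro a _
  simp [pvEmb, Function.comp, Bool.and_comm]

lemma stack_any (orig : List Int) (k i : Nat) (q : Nat → Bool) :
    ((((List.range k).filter q).reverse).map (pvEmb orig)).any (fun tp => tp.1 == i) =
      (decide (i < k) && q i) := by
  rw [List.any_map, List.any_reverse, Bool.eq_iff_iff]
  simp only [List.any_eq_true, List.mem_filter, List.mem_range, Function.comp, pvEmb,
    beq_iff_eq, Bool.and_eq_true, decide_eq_true_eq]
  constructor
  · rintro ⟨x, ⟨hxk, hqx⟩, hx⟩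
    exact ⟨hx ▸ hxk, hx ▸ hqx⟩
  · rintro ⟨hik, hqi⟩
    exact ⟨i, ⟨hik, hqi⟩, rfl⟩

lemma pvPr_length (orig : List Int) (k : Nat) : (pvPr orig k).length = orig.length := by
  simp [pvPr]

lemma pvPr_getD (orig : List Int) (k i : Nat) (h : i < orig.length) :
    (pvPr orig k).getD i 0 =
      match ((orig.take k).drop (i + 1)).findIdx? (fun x => decide (x < pvG orig i)) with
      | some m => ((i + 1 + m : Nat) : Int) - (i : Int)
      | none => pvG orig i := by
  have hl : i < (pvPr orig k).length := by rw [pvPr_length]; exact h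
  rw [List.getD_eq_getElem _ 0 hl]
  simp [pvPr]

lemma pvPr_zero (orig : List Int) : pvPr orig 0 = orig := by
  apply List.ext_getElem (by simp [pvPr_length])
  intro i h1 h2
  rw [← List.getD_eq_getElem (pvPr orig 0) 0 h1, pvPr_getD orig 0 i h2]
  simp [pvG, List.getD_eq_getElem?_getD, List.getElem?_eq_getElem h2]

lemma kept_succ (orig : List Int) (k i : Nat) (h : i < k) :
    pvKept orig (k + 1) i = (pvKept orig k i && decide (pvG orig i ≤ pvG orig k)) := by
  unfold pvKept
  rw [← Bool.decide_and, decide_eq_decide]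
  constructor
  · intro H
    exact ⟨fun j hj hij => H j (by omega) hij, H k (by omega) h⟩
  · rintro ⟨H1, H2⟩ j hj hij
    by_cases hjk : j = k
    · exact hjk ▸ H2
    · exact H1 j (by omega) hij

lemma kept_iff_none (orig : List Int) (k i : Nat) (hk : k ≤ orig.length) :
    pvKept orig k i = true ↔
      ((orig.take k).drop (i + 1)).findIdx? (fun x => decide (x < pvG orig i)) = none := by
  have hlen : ((orig.take k).drop (i + 1)).length = k - (i + 1) := by
    simp [Nat.min_eq_left hk]
  have helt : ∀ (m : Nat) (hm : m < ((orig.take k).drop (i + 1)).length),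
      ((orig.take k).drop (i + 1))[m] = pvG orig (i + 1 + m) := by
    intro m hm
    have hm' : i + 1 + m < k := by omega
    rw [List.getElem_drop, List.getElem_take, pvG,
      List.getD_eq_getElem _ _ (by omega : i + 1 + m < orig.length)]
  rw [List.findIdx?_eq_none_iff]
  unfold pvKept
  rw [decide_eq_true_iff]
  constructor
  · intro H x hx
    rcases List.mem_iff_getElem.mp hx with ⟨m, hm, hxm⟩
    rw [helt m hm] at hxm
    have hj : i + 1 + m < k := by omega
    have := H (i + 1 + m) hj (by omega)
    simp only [decide_eq_false_iff_not, not_lt]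
    omega
  · intro H j hj hij
    have hm : j - (i + 1) < ((orig.take k).drop (i + 1)).length := by omega
    have hmem := List.getElem_mem hm
    have := H _ hmem
    rw [helt _ hm] at this
    have hji : i + 1 + (j - (i + 1)) = j := by omega
    rw [hji] at this
    simp only [decide_eq_false_iff_not, not_lt] at this
    exact this

lemma step_spec (orig : List Int) (k : Nat) (hk : k < orig.length) :
    pvStep (pvStack orig k, pvPr orig k) (k, pvG orig k) = (pvStack orig (k + 1), pvPr orig (k + 1)) := by
  have hsorted := pvStack_sorted orig k
  have hkn : k ≤ orig.length := le_of_lt hk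
  unfold pvStep
  rw [popLoop_eq]
  refine Prod.ext ?_ ?_
  · -- stack component
    show (k, pvG orig k) ::
        (pvStack orig k).dropWhile (fun tp => decide (pvG orig k < tp.2)) = pvStack orig (k + 1)
    rw [dropWhile_eq_filter_of_sorted _ _ hsorted,
        stack_filter orig k (fun x => decide (x ≤ pvG orig k))]
    have hkk : pvKept orig (k + 1) k = true := by
      simp only [pvKept, decide_eq_true_eq]
      intro j h1 h2; omega
    have hfc : List.filter (pvKept orig (k + 1)) (List.range k)
        = List.filter (fun i => pvKept orig k i && decide (pvG orig i ≤ pvG orig k)) (List.range k) := by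
      apply List.filter_congr
      intro a ha
      exact kept_succ orig k a (List.mem_range.mp ha)
    simp only [pvStack, List.range_succ, List.filter_append, hfc]
    simp [hkk, List.reverse_append, pvEmb]
  · -- prices component
    show ((pvStack orig k).takeWhile (fun tp => decide (pvG orig k < tp.2))).foldl (pvSet k)
        (pvPr orig k) = pvPr orig (k + 1)
    rw [takeWhile_eq_filter_of_sorted _ _ hsorted,
        stack_filter orig k (fun x => decide (pvG orig k < x))]
    apply List.ext_getElem
    · rw [foldl_set_length, pvPr_length, pvPr_length]
    intro i h1 h2
    have hin : i < orig.length := by rw [foldl_set_length, pvPr_length] at h1; exact h1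
    rw [← List.getD_eq_getElem _ 0 h1, ← List.getD_eq_getElem _ 0 h2, foldl_set_getD,
      stack_any, pvPr_length, pvPr_getD orig (k + 1) i hin, pvPr_getD orig k i hin]
    by_cases hik : i < k
    · have htake : orig.take (k + 1) = orig.take k ++ [pvG orig k] := by
        rw [List.take_add_one, List.getElem?_eq_getElem hk]
        simp [pvG, List.getD_eq_getElem?_getD, List.getElem?_eq_getElem hk]
      have hdrop : (orig.take (k + 1)).drop (i + 1)
          = (orig.take k).drop (i + 1) ++ [pvG orig k] := by
        rw [htake, List.drop_append_of_le_length (by simp [Nat.min_eq_left hkn]; omega)]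
      have hlen2 : ((orig.take k).drop (i + 1)).length = k - (i + 1) := by
        simp [Nat.min_eq_left hkn]
      rw [hdrop, List.findIdx?_append]
      by_cases hkept : pvKept orig k i = true
      · have hnone := (kept_iff_none orig k i hkn).mp hkept
        rw [hnone, Option.none_or]
        by_cases hlt : pvG orig k < pvG orig i
        · have hany : (decide (i < k) && (pvKept orig k i && decide (pvG orig k < pvG orig i)))
              = true := by simp [hik, hkept, hlt]
          rw [if_pos hany, if_pos hin]
          simp only [List.findIdx?_cons, hlt, decide_true, if_true, List.findIdx?_nil,
            Option.map_some, hlen2]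
          have hq : i + 1 + (0 + (k - (i + 1))) = k := by omega
          rw [hq]
        · have hany : (decide (i < k) && (pvKept orig k i && decide (pvG orig k < pvG orig i)))
              = false := by simp [hlt]
          rw [if_neg (by simp [hany])]
          simp [List.findIdx?_cons, hlt]
      · rcases hsome : ((orig.take k).drop (i + 1)).findIdx? (fun x => decide (x < pvG orig i))
            with _ | m
        · exact absurd ((kept_iff_none orig k i hkn).mpr hsome) hkept
        · have hany : (decide (i < k) && (pvKept orig k i && decide (pvG orig k < pvG orig i)))
              = false := by simp [hkept]
          rw [if_neg (by simp [hany])]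
          rfl
    · have hany : (decide (i < k) && (pvKept orig k i && decide (pvG orig k < pvG orig i)))
          = false := by simp [hik]
      have he1 : (orig.take k).drop (i + 1) = [] :=
        List.drop_eq_nil_of_le (by simp [Nat.min_eq_left hkn]; omega)
      have he2 : (orig.take (k + 1)).drop (i + 1) = [] :=
        List.drop_eq_nil_of_le (by simp; omega)
      rw [if_neg (by simp [hany])]
      simp only [he1, he2, List.findIdx?_nil]

lemma loop_spec (orig : List Int) : ∀ (m k : Nat), k + m = orig.length →
    (pvEnumFrom k (orig.drop k)).foldl pvStep (pvStack orig k, pvPr orig k) =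
      (pvStack orig orig.length, pvPr orig orig.length) := by
  intro m
  induction m with
  | zero =>
    intro k hkm
    have hk : k = orig.length := by omega
    subst hk
    rw [List.drop_eq_nil_of_le (le_refl _)]
    rfl
  | succ m ih =>
    intro k hkm
    have hk : k < orig.length := by omega
    rw [List.drop_eq_getElem_cons hk]
    show (pvEnumFrom k (orig[k] :: orig.drop (k + 1))).foldl pvStep (pvStack orig k, pvPr orig k) = _
    rw [pvEnumFrom, List.foldl_cons]
    have hg : orig[k] = pvG orig k := by rw [pvG, List.getD_eq_getElem _ _ hk]
    rw [hg, step_spec orig k hk]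
    exact ih (k + 1) (by omega)

lemma drain_eq_foldl (cur : Nat) : ∀ (L : List (Nat × Int)) (pr : List Int),
    pvDrain cur L pr = L.foldl (pvSet cur) pr := by
  intro L
  induction L with
  | nil => intro pr; rfl
  | cons tq rest ih =>
    intro pr
    obtain ⟨t, q⟩ := tq
    rw [pvDrain, List.foldl_cons, ih]
    rfl

lemma scan_spec (v : Int) (i n : Nat) : ∀ (l : List Int) (j : Nat),
    pvScan v i n j l =
      match l.findIdx? (fun x => decide (x < v)) with
      | some m => ((j + m : Nat) : Int) - (i : Int)
      | none => ((n : Int) - 1) - (i : Int) := by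
  intro l
  induction l with
  | nil => intro j; simp [pvScan]
  | cons x xs ih =>
    intro j
    by_cases h : x < v
    · simp [pvScan, List.findIdx?_cons, h]
    · rw [pvScan]
      simp only [h, if_false]
      rw [ih (j + 1), List.findIdx?_cons]
      simp only [h, decide_false, Bool.false_eq_true, if_false]
      rcases hfx : xs.findIdx? (fun x => decide (x < v)) with _ | m
      · simp
      · simp only [Option.map_some]
        have : j + 1 + m = j + (m + 1) := by omega
        rw [this]

-- ===== VERDICT (by name: the statement is the Claim_ definition above) =====
theorem solution_spec : Claim_equal_solution := by
  unfold Claim_equal_solution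
  intro prices _
  unfold Spec_solution
  show pvDrain (prices.length - 1) ((pvEnumFrom 0 prices).foldl pvStep ([], prices)).1
      ((pvEnumFrom 0 prices).foldl pvStep ([], prices)).2 = solution_alt prices
  have hinit : (([] : List (Nat × Int)), prices) = (pvStack prices 0, pvPr prices 0) := by
    rw [pvPr_zero]
    simp [pvStack]
  have hloop := loop_spec prices prices.length 0 (by omega)
  rw [List.drop_zero] at hloop
  rw [hinit, hloop]
  show pvDrain (prices.length - 1) (pvStack prices prices.length) (pvPr prices prices.length)
      = solution_alt prices
  rw [drain_eq_foldl]
  apply List.ext_getElem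
  · rw [foldl_set_length, pvPr_length]
    simp [solution_alt]
  intro i h1 h2
  have hn : i < prices.length := by rw [foldl_set_length, pvPr_length] at h1; exact h1
  have hgi : pvG prices i = prices[i] := by rw [pvG, List.getD_eq_getElem _ _ hn]
  show _ = (prices.mapIdx
      (fun i v => pvScan v i prices.length (i + 1) (prices.drop (i + 1))))[i]
  rw [List.getElem_mapIdx, scan_spec]
  rw [← List.getD_eq_getElem _ 0 h1]
  unfold pvStack
  rw [foldl_set_getD, stack_any, pvPr_length, pvPr_getD prices prices.length i hn,
    List.take_length, hgi]
  by_cases hkept : pvKept prices prices.length i = true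
  · have hnone := (kept_iff_none prices prices.length i (le_refl _)).mp hkept
    rw [List.take_length, hgi] at hnone
    rw [if_pos (by simp [hn, hkept]), if_pos hn, hnone]
    show ((prices.length - 1 : Nat) : Int) - (i : Int) = (prices.length : Int) - 1 - (i : Int)
    omega
  · rcases hsome : (prices.drop (i + 1)).findIdx? (fun x => decide (x < prices[i]))
        with _ | m
    · exact absurd ((kept_iff_none prices prices.length i (le_refl _)).mpr
        (by rw [List.take_length, hgi]; exact hsome)) hkept
    · rw [if_neg (by simp [hkept])]
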